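-- pv_equiv track=rewrite | github.com/AndyLi1024/Test | disposition_checker.py | check_disposition
-- ===== SOURCE A (Python) =====
-- def check_disposition(dates, flags):
--     n = len(dates)
--     disposition_days = []
--     for i in range(n):
--         if i >= 2 and flags[i] and flags[i-1] and flags[i-2]:
--             disposition_days.append(dates[i])
--             continue
--         # count last 10 days
--         start10 = max(0, i-9)
--         last10 = sum(flags[start10:i+1])
--         if last10 >= 6:
--             disposition_days.append(dates[i])
--             continue
--         # count last 30 days
--         start30 = max(0, i-29)
--         last30 = sum(flags[start30:i+1])
--         if last30 >= 12:
--             disposition_days.append(dates[i])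
--             continue
--     return disposition_days
-- ===== SOURCE B (Python) =====
-- def check_disposition(dates, flags):
--     # Prefix sums give the per-day window sums; a running streak counter
--     # replaces the three-back index checks.
--     prefix = [0]
--     total = 0
--     for f in flags:
--         total += f
--         prefix.append(total)
--     out = []
--     run = 0
--     for i in range(len(dates)):
--         run = run + 1 if flags[i] else 0
--         if (run >= 3
--                 or prefix[i + 1] - prefix[max(0, i - 9)] >= 6
--                 or prefix[i + 1] - prefix[max(0, i - 29)] >= 12):
--             out.append(dates[i])
--     return out
-- ===== Notes on version B (the rewrite author's own statement) =====
-- stated objective: alternative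
-- what changed: B derives each day's 10/30-day window sums from one precomputed prefix-sum array and replaces the three-back index checks with a running streak counter, a single-pass algorithm doing constant work per day instead of re-summing slices.
-- outside the precondition, e.g. on check_disposition(['a'], []): A returns [], B raises IndexError
import Mathlib
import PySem

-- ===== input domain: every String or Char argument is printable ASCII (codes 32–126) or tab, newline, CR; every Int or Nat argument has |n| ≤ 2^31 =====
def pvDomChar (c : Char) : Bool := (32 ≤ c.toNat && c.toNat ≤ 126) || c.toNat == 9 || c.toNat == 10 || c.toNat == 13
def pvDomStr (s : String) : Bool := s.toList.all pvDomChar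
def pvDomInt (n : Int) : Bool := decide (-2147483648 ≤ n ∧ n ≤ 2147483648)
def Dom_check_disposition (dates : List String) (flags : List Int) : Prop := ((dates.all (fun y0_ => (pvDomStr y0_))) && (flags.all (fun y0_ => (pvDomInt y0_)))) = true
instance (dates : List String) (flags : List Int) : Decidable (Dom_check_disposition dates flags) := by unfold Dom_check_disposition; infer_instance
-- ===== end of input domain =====

-- B is an alternative single-pass algorithm: a precomputed prefix-sum array gives each
-- day's 10/30-day window sums, and a running streak counter replaces the three-back checks.

-- ===== PORT A =====
def check_disposition (dates : List String) (flags : List Int) : List String :=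
  let n := dates.length
  (List.range n).foldl (fun acc (i : Nat) =>
    if 2 ≤ i ∧ PySem.List.pyGetD flags (i : Int) 0 ≠ 0 ∧
        PySem.List.pyGetD flags ((i : Int) - 1) 0 ≠ 0 ∧
        PySem.List.pyGetD flags ((i : Int) - 2) 0 ≠ 0 then
      acc ++ [PySem.List.pyGetD dates (i : Int) ""]
    else
      let start10 : Int := max 0 ((i : Int) - 9)
      let last10 := (PySem.List.slice flags (some start10) (some ((i : Int) + 1))).sum
      if 6 ≤ last10 then
        acc ++ [PySem.List.pyGetD dates (i : Int) ""]
      else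
        let start30 : Int := max 0 ((i : Int) - 29)
        let last30 := (PySem.List.slice flags (some start30) (some ((i : Int) + 1))).sum
        if 12 ≤ last30 then
          acc ++ [PySem.List.pyGetD dates (i : Int) ""]
        else acc) []

-- ===== PORT B =====
def check_disposition_alt (dates : List String) (flags : List Int) : List String :=
  let pr := flags.foldl (fun (s : List Int × Int) f => (s.1 ++ [s.2 + f], s.2 + f)) ([0], 0)
  let pref := pr.1
  ((List.range dates.length).foldl (fun (s : Int × List String) (i : Nat) =>
    let run : Int := if PySem.List.pyGetD flags (i : Int) 0 ≠ 0 then s.1 + 1 else 0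
    let out :=
      if 3 ≤ run ∨
          6 ≤ PySem.List.pyGetD pref ((i : Int) + 1) 0 -
              PySem.List.pyGetD pref (max 0 ((i : Int) - 9)) 0 ∨
          12 ≤ PySem.List.pyGetD pref ((i : Int) + 1) 0 -
              PySem.List.pyGetD pref (max 0 ((i : Int) - 29)) 0 then
        s.2 ++ [PySem.List.pyGetD dates (i : Int) ""]
      else s.2
    (run, out)) ((0 : Int), ([] : List String))).2

-- ===== PRECONDITION & SPEC =====
-- Pre_ excludes inputs with fewer flags than dates: with 3 or more dates A raises
-- IndexError there, and on the remaining excluded corner (at most 2 dates with fewer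
-- flags, where A's slices silently truncate) B itself raises IndexError.
def Pre_check_disposition (dates : List String) (flags : List Int) : Prop :=
  dates.length ≤ flags.length
instance (dates : List String) (flags : List Int) : Decidable (Pre_check_disposition dates flags) := by unfold Pre_check_disposition; infer_instance

def pvWitness_check_disposition : List String × List Int := (["a", "b", "c"], [1, 1, 1])

def Spec_check_disposition (dates : List String) (flags : List Int) (out : List String) : Prop := out = check_disposition_alt dates flags
instance (dates : List String) (flags : List Int) (out : List String) : Decidable (Spec_check_disposition dates flags out) := by unfold Spec_check_disposition; infer_instance

-- ===== CLAIM (what is proved, stated in full; the proofs are below) =====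
def Claim_equal_check_disposition : Prop := ∀ (dates : List String) (flags : List Int), Dom_check_disposition dates flags → Pre_check_disposition dates flags → Spec_check_disposition dates flags (check_disposition dates flags)

-- ===== LEMMAS AND PROOFS =====

def pvS (flags : List Int) (k : Nat) : Int := (flags.take k).sum

def pvRun (flags : List Int) : Nat → Int
  | 0 => 0
  | k + 1 => if flags.getD k 0 ≠ 0 then pvRun flags k + 1 else 0

lemma pvRun_nonneg (flags : List Int) (k : Nat) : 0 ≤ pvRun flags k := by
  induction k with
  | zero => simp [pvRun]
  | succ k ih => unfold pvRun; split <;> omega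

lemma pvRun_three (flags : List Int) (i : Nat) :
    3 ≤ pvRun flags (i + 1) ↔
      (2 ≤ i ∧ flags.getD i 0 ≠ 0 ∧ flags.getD (i - 1) 0 ≠ 0 ∧ flags.getD (i - 2) 0 ≠ 0) := by
  match i with
  | 0 => simp only [pvRun]; split_ifs <;> simp
  | 1 => simp only [pvRun]; split_ifs <;> simp
  | j + 2 =>
    have h0 := pvRun_nonneg flags j
    show 3 ≤ pvRun flags (j + 3) ↔ _
    have e1 : j + 2 - 1 = j + 1 := rfl
    have e2 : j + 2 - 2 = j := rfl
    simp only [pvRun, e1, e2]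
    split_ifs with h1 h2 h3 <;> [omega; simp_all; simp_all; simp_all]

lemma pvPrefix_gen (fs : List Int) : ∀ (p : List Int) (a : Int),
    (fs.foldl (fun (s : List Int × Int) f => (s.1 ++ [s.2 + f], s.2 + f)) (p, a))
      = (p ++ (List.range fs.length).map (fun k => a + (fs.take (k + 1)).sum), a + fs.sum) := by
  induction fs with
  | nil => intro p a; simp
  | cons f fs ih =>
    intro p a
    simp only [List.foldl_cons]
    rw [ih]
    simp [List.range_succ_eq_map, List.map_map, Function.comp, add_assoc]

lemma pvPrefix_spec (flags : List Int) :
    (flags.foldl (fun (s : List Int × Int) f => (s.1 ++ [s.2 + f], s.2 + f)) ([0], 0)).1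
      = (List.range (flags.length + 1)).map (pvS flags) := by
  rw [pvPrefix_gen]
  simp [List.range_succ_eq_map, List.map_map, Function.comp, pvS]

lemma slice_sum (flags : List Int) (a b : Nat) (hab : a ≤ b) :
    ((flags.drop a).take (b - a)).sum = pvS flags b - pvS flags a := by
  have h1 : (flags.drop a).take (b - a) = (flags.take b).drop a := (List.drop_take ..).symm
  have h2 := List.sum_take_add_sum_drop (flags.take b) a
  rw [List.take_take, min_eq_left hab] at h2
  rw [h1]
  unfold pvS
  omega

def pvCanon (dates : List String) (flags : List Int) (m : Nat) : List String :=
  (List.range m).foldl (fun acc i =>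
    if ((2 ≤ i ∧ flags.getD i 0 ≠ 0 ∧ flags.getD (i - 1) 0 ≠ 0 ∧ flags.getD (i - 2) 0 ≠ 0) ∨
        6 ≤ pvS flags (i + 1) - pvS flags (i - 9) ∨
        12 ≤ pvS flags (i + 1) - pvS flags (i - 29)) then acc ++ [dates.getD i ""] else acc) []

lemma pvCanon_succ (dates : List String) (flags : List Int) (m : Nat) :
    pvCanon dates flags (m + 1) =
      if ((2 ≤ m ∧ flags.getD m 0 ≠ 0 ∧ flags.getD (m - 1) 0 ≠ 0 ∧ flags.getD (m - 2) 0 ≠ 0) ∨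
        6 ≤ pvS flags (m + 1) - pvS flags (m - 9) ∨
        12 ≤ pvS flags (m + 1) - pvS flags (m - 29)) then pvCanon dates flags m ++ [dates.getD m ""]
      else pvCanon dates flags m := by
  unfold pvCanon
  rw [List.range_succ, List.foldl_append]
  simp

lemma max_sub_cast (i k : Nat) : max 0 ((i : Int) - k) = ((i - k : Nat) : Int) := by
  omega

lemma cast_add_one (i : Nat) : (i : Int) + 1 = ((i + 1 : Nat) : Int) := by push_cast; ring

lemma pref_getD (flags : List Int) (k : Nat) (hk : k ≤ flags.length) :
    PySem.List.pyGetD ((List.range (flags.length + 1)).map (pvS flags)) (k : Int) 0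
      = pvS flags k := by
  rw [PySem.List.pyGetD_natCast]
  exact PySem.List.getD_map_range (pvS flags) (flags.length + 1) k 0 (by omega)

lemma slice10_sum (flags : List Int) (i k : Nat) :
    (PySem.List.slice flags (some (max 0 ((i : Int) - k))) (some ((i : Int) + 1))).sum
      = pvS flags (i + 1) - pvS flags (i - k) := by
  rw [max_sub_cast i k, cast_add_one i, PySem.List.slice_natCast]
  exact slice_sum flags (i - k) (i + 1) (by omega)

lemma condA_iff (flags : List Int) (i : Nat) :
    (2 ≤ i ∧ PySem.List.pyGetD flags (i : Int) 0 ≠ 0 ∧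
      PySem.List.pyGetD flags ((i : Int) - 1) 0 ≠ 0 ∧
      PySem.List.pyGetD flags ((i : Int) - 2) 0 ≠ 0)
    ↔ (2 ≤ i ∧ flags.getD i 0 ≠ 0 ∧ flags.getD (i - 1) 0 ≠ 0 ∧ flags.getD (i - 2) 0 ≠ 0) := by
  by_cases h2 : 2 ≤ i
  · have e1 : (i : Int) - 1 = ((i - 1 : Nat) : Int) := by omega
    have e2 : (i : Int) - 2 = ((i - 2 : Nat) : Int) := by omega
    rw [e1, e2]
    simp [PySem.List.pyGetD_natCast]
  · simp [h2]

lemma slice_sum9 (flags : List Int) (i : Nat) :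
    (PySem.List.slice flags (some (max 0 ((i : Int) - 9))) (some ((i : Int) + 1))).sum
      = pvS flags (i + 1) - pvS flags (i - 9) := by
  simpa using slice10_sum flags i 9

lemma slice_sum29 (flags : List Int) (i : Nat) :
    (PySem.List.slice flags (some (max 0 ((i : Int) - 29))) (some ((i : Int) + 1))).sum
      = pvS flags (i + 1) - pvS flags (i - 29) := by
  simpa using slice10_sum flags i 29

theorem check_disposition_eq_canon (dates : List String) (flags : List Int) :
    check_disposition dates flags = pvCanon dates flags dates.length := by
  unfold check_disposition pvCanon
  apply PySem.List.foldl_congr_mem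
  intro acc i hmem
  simp only [slice_sum9, slice_sum29, condA_iff]
  simp only [PySem.List.pyGetD_natCast]
  by_cases h1 : (2 ≤ i ∧ flags.getD i 0 ≠ 0 ∧ flags.getD (i - 1) 0 ≠ 0 ∧ flags.getD (i - 2) 0 ≠ 0) <;>
    by_cases h10 : 6 ≤ pvS flags (i + 1) - pvS flags (i - 9) <;>
    by_cases h30 : 12 ≤ pvS flags (i + 1) - pvS flags (i - 29) <;>
    simp [h1, h10, h30]

lemma alt_loop (dates : List String) (flags : List Int) (P : List Int)
    (hP : P = (List.range (flags.length + 1)).map (pvS flags))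
    (hpre : dates.length ≤ flags.length) (m : Nat) (hm : m ≤ dates.length) :
    ((List.range m).foldl (fun (s : Int × List String) (i : Nat) =>
      let run : Int := if PySem.List.pyGetD flags (i : Int) 0 ≠ 0 then s.1 + 1 else 0
      let out :=
        if 3 ≤ run ∨
            6 ≤ PySem.List.pyGetD P ((i : Int) + 1) 0 -
                PySem.List.pyGetD P (max 0 ((i : Int) - 9)) 0 ∨
            12 ≤ PySem.List.pyGetD P ((i : Int) + 1) 0 -
                PySem.List.pyGetD P (max 0 ((i : Int) - 29)) 0 then
          s.2 ++ [PySem.List.pyGetD dates (i : Int) ""]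
        else s.2
      (run, out)) ((0 : Int), ([] : List String)))
    = (pvRun flags m, pvCanon dates flags m) := by
  induction m with
  | zero => simp [pvRun, pvCanon]
  | succ m ih =>
    rw [List.range_succ, List.foldl_append, ih (by omega)]
    simp only [List.foldl_cons, List.foldl_nil]
    have e9 : max 0 ((m : Int) - 9) = ((m - 9 : Nat) : Int) := by omega
    have e29 : max 0 ((m : Int) - 29) = ((m - 29 : Nat) : Int) := by omega
    rw [e9, e29, cast_add_one m, hP,
        pref_getD flags (m + 1) (by omega),
        pref_getD flags (m - 9) (by omega),
        pref_getD flags (m - 29) (by omega)]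
    have hrun : (if PySem.List.pyGetD flags (m : Int) 0 ≠ 0 then pvRun flags m + 1 else 0)
        = pvRun flags (m + 1) := by
      simp [pvRun, PySem.List.pyGetD_natCast]
    rw [hrun]
    have hcond : (3 ≤ pvRun flags (m + 1) ∨
        6 ≤ pvS flags (m + 1) - pvS flags (m - 9) ∨
        12 ≤ pvS flags (m + 1) - pvS flags (m - 29)) ↔
        ((2 ≤ m ∧ flags.getD m 0 ≠ 0 ∧ flags.getD (m - 1) 0 ≠ 0 ∧ flags.getD (m - 2) 0 ≠ 0) ∨
        6 ≤ pvS flags (m + 1) - pvS flags (m - 9) ∨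
        12 ≤ pvS flags (m + 1) - pvS flags (m - 29)) := by
      rw [pvRun_three]
    rw [PySem.List.pyGetD_natCast dates]
    simp only [hcond]
    rw [← pvCanon_succ]

theorem check_disposition_alt_eq_canon (dates : List String) (flags : List Int)
    (hpre : dates.length ≤ flags.length) :
    check_disposition_alt dates flags = pvCanon dates flags dates.length := by
  unfold check_disposition_alt
  simp only [pvPrefix_spec]
  exact congrArg Prod.snd (alt_loop dates flags _ rfl hpre dates.length le_rfl)

-- ===== VERDICT (by name: the statement is the Claim_ definition above) =====
theorem check_disposition_spec : Claim_equal_check_disposition := by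
  intro dates flags _ hpre
  unfold Spec_check_disposition
  rw [check_disposition_eq_canon dates flags,
      check_disposition_alt_eq_canon dates flags hpre]
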